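-- pv_equiv track=rewrite | github.com/don09dandidi/DSL- | regex_generator.py | _split_alternatives
-- ===== SOURCE A (Python) =====
-- def _split_alternatives(group_content: str) -> list[str]:
--     """Split 'A|B|C' respecting nested parens."""
--     alternatives = []
--     depth = 0
--     current = []
--     for ch in group_content:
--         if ch == '(':
--             depth += 1
--             current.append(ch)
--         elif ch == ')':
--             depth -= 1
--             current.append(ch)
--         elif ch == '|' and depth == 0:
--             alternatives.append(''.join(current))
--             current = []
--         else:
--             current.append(ch)
--     if current:
--         alternatives.append(''.join(current))
--     return alternatives
-- ===== SOURCE B (Python) =====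
-- def _split_alternatives(group_content: str) -> list[str]:
--     """Split 'A|B|C' respecting nested parens (cut-point/slice version)."""
--     cuts = []
--     depth = 0
--     for i, ch in enumerate(group_content):
--         if ch == '(':
--             depth += 1
--         elif ch == ')':
--             depth -= 1
--         elif ch == '|' and depth == 0:
--             cuts.append(i)
--     starts = [0] + [c + 1 for c in cuts]
--     ends = cuts + [len(group_content)]
--     segs = [group_content[a:b] for a, b in zip(starts, ends)]
--     if segs and segs[-1] == '':
--         segs.pop()
--     return segs
-- ===== Notes on version B (the rewrite author's own statement) =====
-- stated objective: alternative
-- what changed: Instead of accumulating characters into a current buffer and flushing it at each top-level pipe, B first collects only the indices of top-level pipes in one depth-tracking scan and then builds the result by slicing the string between successive cut points, popping a trailing empty segment.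
import Mathlib
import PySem

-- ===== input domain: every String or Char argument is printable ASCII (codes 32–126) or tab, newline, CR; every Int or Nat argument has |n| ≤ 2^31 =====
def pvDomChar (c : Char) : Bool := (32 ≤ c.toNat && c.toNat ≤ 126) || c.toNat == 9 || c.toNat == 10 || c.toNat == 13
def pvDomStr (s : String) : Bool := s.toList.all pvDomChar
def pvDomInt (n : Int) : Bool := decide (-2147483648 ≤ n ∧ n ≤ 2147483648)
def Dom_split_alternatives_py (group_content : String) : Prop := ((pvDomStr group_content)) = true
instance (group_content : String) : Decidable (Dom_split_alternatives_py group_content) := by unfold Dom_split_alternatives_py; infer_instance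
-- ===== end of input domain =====

-- B replaces A's accumulate-and-flush buffer with one scan collecting top-level '|' indices
-- followed by slicing between cut points (objective: alternative decomposition, same cost).

-- ===== PORT A =====
def split_alternatives_py (group_content : String) : List String :=
  let st := group_content.toList.foldl
    (fun (st : List String × Int × List Char) ch =>
      let alts := st.1; let depth := st.2.1; let current := st.2.2
      if ch = '(' then (alts, depth + 1, current ++ [ch])
      else if ch = ')' then (alts, depth - 1, current ++ [ch])
      else if ch = '|' ∧ depth = 0 then (alts ++ [String.ofList current], depth, [])
      else (alts, depth, current ++ [ch]))
    ([], 0, [])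
  if st.2.2 ≠ [] then st.1 ++ [String.ofList st.2.2] else st.1

-- ===== PORT B =====
def split_alternatives_py_alt (group_content : String) : List String :=
  let s := group_content.toList
  let cuts := ((PySem.List.enumerate s 0).foldl
    (fun (st : Int × List Int) p =>
      let depth := st.1; let cuts := st.2
      if p.2 = '(' then (depth + 1, cuts)
      else if p.2 = ')' then (depth - 1, cuts)
      else if p.2 = '|' ∧ depth = 0 then (depth, cuts ++ [p.1])
      else (depth, cuts)) ((0 : Int), ([] : List Int))).2
  let starts := 0 :: cuts.map (· + 1)
  let ends := cuts ++ [(s.length : Int)]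
  let segs := (starts.zip ends).map
    (fun p => String.ofList (PySem.List.slice s (some p.1) (some p.2)))
  if segs.getLast? = some "" then segs.dropLast else segs

-- ===== PRECONDITION & SPEC =====
def Spec_split_alternatives_py (group_content : String) (out : List String) : Prop := out = split_alternatives_py_alt group_content
instance (group_content : String) (out : List String) : Decidable (Spec_split_alternatives_py group_content out) := by unfold Spec_split_alternatives_py; infer_instance

-- ===== CLAIM (what is proved, stated in full; the proofs are below) =====
def Claim_equal_split_alternatives_py : Prop := ∀ (group_content : String), Dom_split_alternatives_py group_content → Spec_split_alternatives_py group_content (split_alternatives_py group_content)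

-- ===== LEMMAS AND PROOFS =====

-- Common recursive characterisation: (first segment, remaining segments) of a suffix at depth d.
def pvRawP (d : Int) : List Char → List Char × List (List Char)
  | [] => ([], [])
  | c :: t =>
    if c = '(' then let p := pvRawP (d + 1) t; (c :: p.1, p.2)
    else if c = ')' then let p := pvRawP (d - 1) t; (c :: p.1, p.2)
    else if c = '|' ∧ d = 0 then let p := pvRawP d t; ([], p.1 :: p.2)
    else let p := pvRawP d t; (c :: p.1, p.2)

-- drop the last segment iff it is empty
def pvPopT : List (List Char) → List (List Char)
  | [] => []
  | [x] => if x = [] then [] else [x]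
  | x :: y :: ys => x :: pvPopT (y :: ys)

def pvCutsAux (i d : Int) : List Char → List Int
  | [] => []
  | c :: t =>
    if c = '(' then pvCutsAux (i + 1) (d + 1) t
    else if c = ')' then pvCutsAux (i + 1) (d - 1) t
    else if c = '|' ∧ d = 0 then i :: pvCutsAux (i + 1) d t
    else pvCutsAux (i + 1) d t

def pvSegsB (s : List Char) (cuts : List Int) : List (List Char) :=
  ((0 :: cuts.map (· + 1)).zip (cuts ++ [(s.length : Int)])).map
    (fun p => PySem.List.slice s (some p.1) (some p.2))

lemma pvPopT_cons (x : List Char) (y : List Char) (ys : List (List Char)) :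
    pvPopT (x :: y :: ys) = x :: pvPopT (y :: ys) := rfl

-- A-side loop characterisation
lemma pvA_loop (t : List Char) : ∀ (alts : List String) (d : Int) (cur : List Char),
    (let st := t.foldl
        (fun (st : List String × Int × List Char) ch =>
          let alts := st.1; let depth := st.2.1; let current := st.2.2
          if ch = '(' then (alts, depth + 1, current ++ [ch])
          else if ch = ')' then (alts, depth - 1, current ++ [ch])
          else if ch = '|' ∧ depth = 0 then (alts ++ [String.ofList current], depth, [])
          else (alts, depth, current ++ [ch]))
        (alts, d, cur)
      if st.2.2 ≠ [] then st.1 ++ [String.ofList st.2.2] else st.1)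
    = alts ++ (pvPopT ((cur ++ (pvRawP d t).1) :: (pvRawP d t).2)).map String.ofList := by
  induction t with
  | nil =>
    intro alts d cur
    simp only [List.foldl_nil, pvRawP, pvPopT, List.append_nil]
    by_cases h : cur = [] <;> simp [h, pvPopT]
  | cons c t ih =>
    intro alts d cur
    by_cases h1 : c = '('
    · simp only [List.foldl_cons, pvRawP, h1, if_pos rfl, if_true]
      rw [ih]
      simp [List.append_assoc]
    · by_cases h2 : c = ')'
      · simp only [List.foldl_cons, pvRawP, h1, h2, if_neg h1, if_pos rfl, if_true]
        rw [ih]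
        simp [h1, List.append_assoc]
      · by_cases h3 : c = '|' ∧ d = 0
        · simp only [List.foldl_cons, pvRawP, if_neg h1, if_neg h2, if_pos h3]
          rw [ih]
          simp [pvPopT_cons, List.append_assoc]
        · simp only [List.foldl_cons, pvRawP, if_neg h1, if_neg h2, if_neg h3]
          rw [ih]
          simp [List.append_assoc]

-- B-side: the fold over enumerate computes pvCutsAux
lemma pvB_cuts (t : List Char) : ∀ (i d : Int) (acc : List Int),
    ((PySem.List.enumerate t i).foldl
      (fun (st : Int × List Int) p =>
        let depth := st.1; let cuts := st.2
        if p.2 = '(' then (depth + 1, cuts)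
        else if p.2 = ')' then (depth - 1, cuts)
        else if p.2 = '|' ∧ depth = 0 then (depth, cuts ++ [p.1])
        else (depth, cuts)) (d, acc)).2 = acc ++ pvCutsAux i d t := by
  induction t with
  | nil => intro i d acc; simp [PySem.List.enumerate_nil, pvCutsAux]
  | cons c t ih =>
    intro i d acc
    rw [PySem.List.enumerate_cons]
    by_cases h1 : c = '('
    · simp only [List.foldl_cons, h1, if_pos rfl, pvCutsAux, if_true]
      exact ih (i + 1) (d + 1) acc
    · by_cases h2 : c = ')'
      · simp only [List.foldl_cons, h2, if_neg h1, if_pos rfl, pvCutsAux, if_true]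
        simp [h1]
        exact ih (i + 1) (d - 1) acc
      · by_cases h3 : c = '|' ∧ d = 0
        · simp only [List.foldl_cons, pvCutsAux, if_neg h1, if_neg h2, if_pos h3]
          rw [ih (i + 1) d (acc ++ [i])]
          simp
        · simp only [List.foldl_cons, pvCutsAux, if_neg h1, if_neg h2, if_neg h3]
          exact ih (i + 1) d acc

lemma pvCutsAux_shift (t : List Char) : ∀ (i d : Int),
    pvCutsAux (i + 1) d t = (pvCutsAux i d t).map (· + 1) := by
  induction t with
  | nil => intro i d; simp [pvCutsAux]
  | cons c t ih =>
    intro i d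
    by_cases h1 : c = '('
    · simp [pvCutsAux, h1, ih]
    · by_cases h2 : c = ')'
      · simp [pvCutsAux, h1, h2, ih]
      · by_cases h3 : c = '|' ∧ d = 0
        · simp [pvCutsAux, h1, h2, h3, ih]
        · simp [pvCutsAux, h1, h2, h3, ih]

lemma pvCutsAux_nonneg (t : List Char) : ∀ (i d : Int), 0 ≤ i →
    ∀ x ∈ pvCutsAux i d t, 0 ≤ x := by
  induction t with
  | nil => intro i d _ x hx; simp [pvCutsAux] at hx
  | cons c t ih =>
    intro i d hi x hx
    by_cases h1 : c = '('
    · exact ih (i + 1) (d + 1) (by omega) x (by simpa [pvCutsAux, h1] using hx)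
    · by_cases h2 : c = ')'
      · exact ih (i + 1) (d - 1) (by omega) x (by simpa [pvCutsAux, h1, h2] using hx)
      · by_cases h3 : c = '|' ∧ d = 0
        · simp only [pvCutsAux, if_neg h1, if_neg h2, if_pos h3, List.mem_cons] at hx
          rcases hx with rfl | hx
          · exact hi
          · exact ih (i + 1) d (by omega) x hx
        · exact ih (i + 1) d (by omega) x (by simpa [pvCutsAux, h1, h2, h3] using hx)

-- slice of a cons at shifted nonnegative bounds
lemma pvSlice_shift (c : Char) (t : List Char) (a b : Int) (ha : 0 ≤ a) (hb : 0 ≤ b) :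
    PySem.List.slice (c :: t) (some (a + 1)) (some (b + 1)) =
    PySem.List.slice t (some a) (some b) := by
  rw [PySem.List.slice_toNat _ (by omega : (0:Int) ≤ a + 1) (by omega : (0:Int) ≤ b + 1),
      PySem.List.slice_toNat _ ha hb]
  have h1 : (a + 1).toNat = a.toNat + 1 := by omega
  have h2 : (b + 1).toNat = b.toNat + 1 := by omega
  rw [h1, h2]
  simp

lemma pvZip_shift (c : Char) (t : List Char) :
    ∀ (X Y : List Int), (∀ x ∈ X, 0 ≤ x) → (∀ y ∈ Y, 0 ≤ y) →
    ((X.map (· + 1)).zip (Y.map (· + 1))).map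
      (fun p => PySem.List.slice (c :: t) (some p.1) (some p.2)) =
    (X.zip Y).map (fun p => PySem.List.slice t (some p.1) (some p.2)) := by
  intro X
  induction X with
  | nil => intro Y _ _; simp
  | cons x xs ih =>
    intro Y hX hY
    cases Y with
    | nil => simp
    | cons y ys =>
      simp only [List.map_cons, List.zip_cons_cons]
      rw [pvSlice_shift c t x y (hX x (by simp)) (hY y (by simp))]
      rw [ih ys (fun a ha => hX a (by simp [ha])) (fun a ha => hY a (by simp [ha]))]

lemma pvSlice_zero_to (t : List Char) (b : Int) (hb : 0 ≤ b) :
    PySem.List.slice t (some 0) (some b) = t.take b.toNat := by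
  rw [PySem.List.slice_toNat _ le_rfl hb]; simp

-- B-side main: the slice pipeline over the cuts equals the recursive segmentation
lemma pvB_segs (t : List Char) : ∀ (d : Int),
    pvSegsB t (pvCutsAux 0 d t) = (pvRawP d t).1 :: (pvRawP d t).2 := by
  induction t with
  | nil =>
    intro d
    simp [pvSegsB, pvCutsAux, pvRawP, PySem.List.slice]
  | cons c t ih =>
    intro d
    have hnn' : ∀ d', ∀ x ∈ pvCutsAux 0 d' t, 0 ≤ x :=
      fun d' => pvCutsAux_nonneg t 0 d' le_rfl
    have hlen : (((c :: t).length : Nat) : Int) = (t.length : Int) + 1 := by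
      push_cast [List.length_cons]; ring
    -- the not-a-top-level-pipe shape, for any continuation depth d'
    have key : ∀ d', pvSegsB (c :: t) ((pvCutsAux 0 d' t).map (· + 1)) =
        (c :: (pvRawP d' t).1) :: (pvRawP d' t).2 := by
      intro d'
      have ih' := ih d'
      rw [pvSegsB] at ih'
      cases hcse : pvCutsAux 0 d' t with
      | nil =>
        rw [hcse] at ih'
        simp only [List.map_nil, List.nil_append, List.zip_cons_cons, List.zip_nil_right,
          List.map_cons, List.map_nil] at ih'
        rw [pvSlice_zero_to _ _ (by positivity)] at ih'
        injection ih' with hf hr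
        unfold pvSegsB
        simp only [List.map_nil, List.nil_append, List.zip_cons_cons, List.zip_nil_right,
          List.map_cons, List.map_nil]
        rw [hlen, pvSlice_zero_to _ _ (by positivity)]
        have h1 : ((t.length : Int) + 1).toNat = (t.length : Int).toNat + 1 := by omega
        rw [h1, List.take_succ_cons, hf, ← hr]
      | cons k ks =>
        have hk : 0 ≤ k := hnn' d' k (by rw [hcse]; simp)
        have hks : ∀ x ∈ ks, 0 ≤ x := fun x hx => hnn' d' x (by rw [hcse]; simp [hx])
        rw [hcse] at ih'
        simp only [List.map_cons, List.cons_append, List.zip_cons_cons, List.map_cons] at ih'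
        injection ih' with hf hr
        unfold pvSegsB
        simp only [List.map_cons, List.cons_append, List.zip_cons_cons, List.map_cons]
        rw [hlen]
        have h0 : PySem.List.slice (c :: t) (some 0) (some (k + 1)) =
            c :: PySem.List.slice t (some 0) (some k) := by
          rw [pvSlice_zero_to _ _ (by omega), pvSlice_zero_to _ _ hk]
          have : (k + 1).toNat = k.toNat + 1 := by omega
          rw [this]; simp
        rw [h0, hf]
        congr 1
        have e : ((k + 1 + 1) :: (ks.map (· + 1)).map (· + 1)).zip
              (ks.map (· + 1) ++ [(t.length : Int) + 1])
            = (((k + 1) :: ks.map (· + 1)).map (· + 1)).zip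
              ((ks ++ [(t.length : Int)]).map (· + 1)) := by simp
        rw [e, pvZip_shift c t ((k + 1) :: ks.map (· + 1)) (ks ++ [(t.length : Int)])
              (by intro x hx; simp at hx
                  rcases hx with rfl | ⟨a, ha, rfl⟩
                  · omega
                  · have := hks a ha; omega)
              (by intro y hy; simp at hy
                  rcases hy with hy | rfl
                  · exact hks y hy
                  · positivity)]
        exact hr
    by_cases h3 : c = '|' ∧ d = 0
    · have h1 : c ≠ '(' := by rintro rfl; simp at h3
      have h2 : c ≠ ')' := by rintro rfl; simp at h3
      have hr : pvRawP d (c :: t) = ([], (pvRawP d t).1 :: (pvRawP d t).2) := by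
        rw [pvRawP]; simp [h1, h2, h3]
      have hc : pvCutsAux 0 d (c :: t) = 0 :: (pvCutsAux 0 d t).map (· + 1) := by
        rw [pvCutsAux]
        simp only [if_neg h1, if_neg h2, if_pos h3]
        rw [show (0:Int) + 1 = 1 from rfl, ← pvCutsAux_shift]
        norm_num
      rw [hr, hc]
      unfold pvSegsB
      simp only [List.map_cons, List.cons_append, List.zip_cons_cons, List.map_cons]
      have hfirst : PySem.List.slice (c :: t) (some 0) (some 0) = [] := by
        rw [pvSlice_zero_to _ _ le_rfl]; simp
      rw [hlen, hfirst]
      congr 1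
      have e : (((0:Int) + 1) :: ((pvCutsAux 0 d t).map (· + 1)).map (· + 1)).zip
            ((pvCutsAux 0 d t).map (· + 1) ++ [(t.length : Int) + 1])
          = ((0 :: (pvCutsAux 0 d t).map (· + 1)).map (· + 1)).zip
            (((pvCutsAux 0 d t) ++ [(t.length : Int)]).map (· + 1)) := by simp
      rw [e, pvZip_shift c t (0 :: (pvCutsAux 0 d t).map (· + 1))
            ((pvCutsAux 0 d t) ++ [(t.length : Int)])
            (by intro x hx; simp at hx
                rcases hx with rfl | ⟨a, ha, rfl⟩
                · omega
                · have := hnn' d a ha; omega)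
            (by intro y hy; simp at hy
                rcases hy with hy | rfl
                · exact hnn' d y hy
                · positivity)]
      have := ih d
      rw [pvSegsB] at this
      exact this
    · by_cases h1 : c = '('
      · have hr : pvRawP d (c :: t) = (c :: (pvRawP (d+1) t).1, (pvRawP (d+1) t).2) := by
          rw [pvRawP]; simp [h1]
        have hc : pvCutsAux 0 d (c :: t) = (pvCutsAux 0 (d+1) t).map (· + 1) := by
          rw [pvCutsAux]; simp only [if_pos h1]
          rw [show (0:Int) + 1 = 1 from rfl, ← pvCutsAux_shift]; norm_num
        rw [hr, hc, key (d+1)]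
      · by_cases h2 : c = ')'
        · have hr : pvRawP d (c :: t) = (c :: (pvRawP (d-1) t).1, (pvRawP (d-1) t).2) := by
            rw [pvRawP]; simp [h1, h2]
          have hc : pvCutsAux 0 d (c :: t) = (pvCutsAux 0 (d-1) t).map (· + 1) := by
            rw [pvCutsAux]; simp only [if_neg h1, if_pos h2]
            rw [show (0:Int) + 1 = 1 from rfl, ← pvCutsAux_shift]; norm_num
          rw [hr, hc, key (d-1)]
        · have hr : pvRawP d (c :: t) = (c :: (pvRawP d t).1, (pvRawP d t).2) := by
            rw [pvRawP]; simp [h1, h2, h3]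
          have hc : pvCutsAux 0 d (c :: t) = (pvCutsAux 0 d t).map (· + 1) := by
            rw [pvCutsAux]; simp only [if_neg h1, if_neg h2, if_neg h3]
            rw [show (0:Int) + 1 = 1 from rfl, ← pvCutsAux_shift]; norm_num
          rw [hr, hc, key d]

-- the string-level trailing-pop equals pvPopT under the map
lemma pvPop_map : ∀ (l : List (List Char)), l ≠ [] →
    (if (l.map String.ofList).getLast? = some "" then (l.map String.ofList).dropLast
     else l.map String.ofList) = (pvPopT l).map String.ofList := by
  intro l
  induction l with
  | nil => intro h; exact absurd rfl h
  | cons x xs ih =>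
    intro _
    cases xs with
    | nil =>
      simp only [List.map_cons, List.map_nil, List.getLast?_singleton, pvPopT]
      by_cases hx : x = []
      · subst hx; simp
      · have hne : String.ofList x ≠ "" := by
          intro h; exact hx (by simpa using congrArg String.toList h)
        simp [hx, hne]
    | cons y ys =>
      have h' : (y :: ys) ≠ [] := by simp
      have ih' := ih h'
      simp only [List.map_cons] at ih' ⊢
      rw [List.getLast?_cons_cons, pvPopT_cons, List.map_cons]
      by_cases hcond : ((y :: ys).map String.ofList).getLast? = some ""
      · simp only [List.map_cons] at hcond
        rw [if_pos hcond]
        rw [if_pos hcond] at ih'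
        rw [List.dropLast_cons_of_ne_nil (by simp)]
        rw [ih']
      · simp only [List.map_cons] at hcond
        rw [if_neg hcond]
        rw [if_neg hcond] at ih'
        rw [ih']

-- ===== VERDICT (by name: the statement is the Claim_ definition above) =====
theorem split_alternatives_py_spec : Claim_equal_split_alternatives_py := by
  intro s _
  unfold Spec_split_alternatives_py split_alternatives_py split_alternatives_py_alt
  rw [pvA_loop s.toList [] 0 []]
  dsimp only
  rw [pvB_cuts s.toList 0 0 []]
  simp only [List.nil_append]
  have hsegs : ((0 :: (pvCutsAux 0 0 s.toList).map (· + 1)).zip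
        (pvCutsAux 0 0 s.toList ++ [(s.toList.length : Int)])).map
        (fun p => String.ofList (PySem.List.slice s.toList (some p.1) (some p.2)))
      = (pvSegsB s.toList (pvCutsAux 0 0 s.toList)).map String.ofList := by
    unfold pvSegsB; rw [List.map_map]; rfl
  rw [hsegs, pvB_segs s.toList 0]
  exact (pvPop_map ((pvRawP 0 s.toList).1 :: (pvRawP 0 s.toList).2) (by simp)).symm
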